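-- pv_equiv track=rewrite | github.com/ysjinxsy/rfl | commands.py | calculate_chemistry
-- ===== SOURCE A (Python) =====
-- def calculate_chemistry(cards):
--     clubs = {}
--     countries = {}
--
--     for card in cards:
--         _, _, _, _, club, country, _ = card
--         clubs[club] = clubs.get(club, 0) + 1
--         countries[country] = countries.get(country, 0) + 1
--
--     max_club_chemistry = max(clubs.values(), default=0)
--     max_country_chemistry = max(countries.values(), default=0)
--
--     chemistry = max_club_chemistry + max_country_chemistry
--
--     if max_club_chemistry >= 5 or max_country_chemistry >= 5:
--         level = 'green'
--     elif max_club_chemistry >= 3 or max_country_chemistry >= 3: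
--         level = 'orange'
--     else:
--         level = 'red'
--
--     return chemistry, level
-- ===== SOURCE B (Python) =====
-- def _longest_run(values):
--     # length of the longest run of equal values in a sorted list
--     if not values:
--         return 0
--     prev = values[0]
--     run = 1
--     best = 1
--     for v in values[1:]:
--         if v == prev:
--             run += 1
--             best = max(best, run)
--         else:
--             run = 1
--             best = max(best, 1)
--         prev = v
--     return best
--
--
-- def calculate_chemistry(cards):
--     clubs = sorted(card[4] for card in cards)
--     countries = sorted(card[5] for card in cards)
--
--     max_club_chemistry = _longest_run(clubs)
--     max_country_chemistry = _longest_run(countries)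
--
--     chemistry = max_club_chemistry + max_country_chemistry
--
--     if max_club_chemistry >= 5 or max_country_chemistry >= 5:
--         level = 'green'
--     elif max_club_chemistry >= 3 or max_country_chemistry >= 3:
--         level = 'orange'
--     else:
--         level = 'red'
--
--     return chemistry, level
-- ===== Notes on version B (the rewrite author's own statement) =====
-- stated objective: alternative
-- what changed: Replaces the two counting dicts with sort-then-scan: each column is sorted, so equal values are adjacent, and the maximum frequency is the longest run of equal values found in one linear scan.
import Mathlib
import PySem

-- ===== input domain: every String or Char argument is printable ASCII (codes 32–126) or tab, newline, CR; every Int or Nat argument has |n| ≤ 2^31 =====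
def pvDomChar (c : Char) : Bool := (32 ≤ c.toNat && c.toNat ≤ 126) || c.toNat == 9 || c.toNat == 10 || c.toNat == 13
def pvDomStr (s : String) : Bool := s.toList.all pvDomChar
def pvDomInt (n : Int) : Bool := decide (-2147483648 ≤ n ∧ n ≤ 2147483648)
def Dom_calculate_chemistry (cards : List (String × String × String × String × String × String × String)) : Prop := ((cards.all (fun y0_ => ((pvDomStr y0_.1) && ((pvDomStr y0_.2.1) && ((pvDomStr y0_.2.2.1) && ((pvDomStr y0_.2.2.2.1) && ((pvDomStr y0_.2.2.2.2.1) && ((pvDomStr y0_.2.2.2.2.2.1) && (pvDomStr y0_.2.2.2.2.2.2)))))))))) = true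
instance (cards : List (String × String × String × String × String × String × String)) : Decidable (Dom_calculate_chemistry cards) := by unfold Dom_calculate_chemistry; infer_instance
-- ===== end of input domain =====

-- B drops A's two counting dicts: it sorts each column so equal values are adjacent and takes the
-- max frequency as the longest run of equal values in one scan (alternative algorithm, not faster).


-- ===== PORT A =====
def calculate_chemistry (cards : List (String × String × String × String × String × String × String)) : Int × String :=
  -- for card in cards: unpack, count into the two dicts (one fold with a pair of dicts)
  let st := cards.foldl
    (fun (s : PySem.Dict String Int × PySem.Dict String Int) card =>
      (s.1.insert card.2.2.2.2.1 (s.1.getD card.2.2.2.2.1 0 + 1),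
       s.2.insert card.2.2.2.2.2.1 (s.2.getD card.2.2.2.2.2.1 0 + 1)))
    (PySem.Dict.empty, PySem.Dict.empty)
  let max_club_chemistry := PySem.List.maxD st.1.values (fun x => x) 0
  let max_country_chemistry := PySem.List.maxD st.2.values (fun x => x) 0
  let chemistry := max_club_chemistry + max_country_chemistry
  let level :=
    if max_club_chemistry ≥ 5 ∨ max_country_chemistry ≥ 5 then "green"
    else if max_club_chemistry ≥ 3 ∨ max_country_chemistry ≥ 3 then "orange"
    else "red"
  (chemistry, level)

-- ===== PORT B =====
-- the loop of _longest_run: state (prev, run, best), 'best = max(best, run)' after each update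
def pvGo : String → Int → Int → List String → Int
  | _, _, best, [] => best
  | p, run, best, v :: vs =>
      if v = p then pvGo v (run + 1) (max best (run + 1)) vs
      else pvGo v 1 (max best 1) vs

-- _longest_run(values): 0 on empty, else scan values[1:] starting from (values[0], 1, 1)
def pvLongestRun : List String → Int
  | [] => 0
  | x :: xs => pvGo x 1 1 xs

def calculate_chemistry_alt (cards : List (String × String × String × String × String × String × String)) : Int × String :=
  let clubs := PySem.List.sorted (cards.map (fun card => card.2.2.2.2.1)) (fun x => x) false
  let countries := PySem.List.sorted (cards.map (fun card => card.2.2.2.2.2.1)) (fun x => x) false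
  let max_club_chemistry := pvLongestRun clubs
  let max_country_chemistry := pvLongestRun countries
  let chemistry := max_club_chemistry + max_country_chemistry
  let level :=
    if max_club_chemistry ≥ 5 ∨ max_country_chemistry ≥ 5 then "green"
    else if max_club_chemistry ≥ 3 ∨ max_country_chemistry ≥ 3 then "orange"
    else "red"
  (chemistry, level)

-- ===== PRECONDITION & SPEC =====
def Spec_calculate_chemistry (cards : List (String × String × String × String × String × String × String)) (out : Int × String) : Prop := out = calculate_chemistry_alt cards
instance (cards : List (String × String × String × String × String × String × String)) (out : Int × String) : Decidable (Spec_calculate_chemistry cards out) := by unfold Spec_calculate_chemistry; infer_instance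

-- ===== CLAIM (what is proved, stated in full; the proofs are below) =====
def Claim_equal_calculate_chemistry : Prop := ∀ (cards : List (String × String × String × String × String × String × String)), Dom_calculate_chemistry cards → Spec_calculate_chemistry cards (calculate_chemistry cards)

-- ===== LEMMAS AND PROOFS =====

-- max of a list of Ints (default 0) only depends on which values occur in the list
lemma maxD_id_congr_mem (l1 l2 : List Int) (h : ∀ x, x ∈ l1 ↔ x ∈ l2) :
    PySem.List.maxD l1 (fun x => x) 0 = PySem.List.maxD l2 (fun x => x) 0 := by
  unfold PySem.List.maxD
  rcases h1 : PySem.List.max? l1 (fun x => x) with _ | m1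
  · have : l1 = [] := (PySem.List.max?_eq_none_iff _ _).mp h1
    subst this
    have h2 : l2 = [] := by
      cases l2 with
      | nil => rfl
      | cons a t => exact absurd ((h a).mpr (List.mem_cons_self)) (by simp)
    subst h2; rfl
  · rcases h2 : PySem.List.max? l2 (fun x => x) with _ | m2
    · have : l2 = [] := (PySem.List.max?_eq_none_iff _ _).mp h2
      subst this
      exact absurd ((h m1).mp (PySem.List.max?_mem h1)) (by simp)
    · simp only [Option.getD_some]
      exact le_antisymm
        (PySem.List.max?_isMax h2 m1 ((h m1).mp (PySem.List.max?_mem h1)))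
        (PySem.List.max?_isMax h1 m2 ((h m2).mpr (PySem.List.max?_mem h2)))

-- the max of the counter dict's values is the max over elements of their count
lemma maxD_counter_values (l : List String) :
    PySem.List.maxD (PySem.Dict.counter l).values (fun x => x) 0
      = PySem.List.maxD (l.map (fun c => (l.count c : Int))) (fun x => x) 0 := by
  have hv : (PySem.Dict.counter l).values
      = (PySem.Set.ofList l).map (fun k => (l.count k : Int)) := by
    show ((PySem.Dict.counter l).items).map (·.2) = _
    rw [PySem.Dict.items_counter]
    simp [List.map_map, Function.comp]
  rw [hv]
  apply maxD_id_congr_mem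
  intro x
  simp only [List.mem_map, PySem.Set.mem_ofList]

-- A's counting fold over cards is the pair of counters of the projected columns
lemma fold_pair_eq_counters (cards : List (String × String × String × String × String × String × String)) :
    cards.foldl
      (fun (s : PySem.Dict String Int × PySem.Dict String Int) card =>
        (s.1.insert card.2.2.2.2.1 (s.1.getD card.2.2.2.2.1 0 + 1),
         s.2.insert card.2.2.2.2.2.1 (s.2.getD card.2.2.2.2.2.1 0 + 1)))
      (PySem.Dict.empty, PySem.Dict.empty)
    = (PySem.Dict.counter (cards.map (fun card => card.2.2.2.2.1)),
       PySem.Dict.counter (cards.map (fun card => card.2.2.2.2.2.1))) := by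
  have h := PySem.List.foldl_prod_mk
      (f := fun (d : PySem.Dict String Int) (card : String × String × String × String × String × String × String) => d.insert card.2.2.2.2.1 (d.getD card.2.2.2.2.1 0 + 1))
      (g := fun (d : PySem.Dict String Int) (card : String × String × String × String × String × String × String) => d.insert card.2.2.2.2.2.1 (d.getD card.2.2.2.2.2.1 0 + 1))
      cards PySem.Dict.empty PySem.Dict.empty
  refine Eq.trans h ?_
  have e1 : ∀ (proj : (String × String × String × String × String × String × String) → String),
      List.foldl (fun (d : PySem.Dict String Int) card => d.insert (proj card) (d.getD (proj card) 0 + 1))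
        PySem.Dict.empty cards
      = PySem.Dict.counter (cards.map proj) :=
    fun proj => (List.foldl_map).symm.trans (PySem.Dict.foldl_insert_getD_add_one_eq_counter _)
  exact congrArg₂ Prod.mk (e1 _) (e1 _)

-- running max: a max in the accumulator can be pulled out of the fold
lemma foldl_max_max (l : List Int) : ∀ a b : Int, l.foldl max (max a b) = max a (l.foldl max b) := by
  induction l with
  | nil => intro a b; rfl
  | cons c t ih =>
    intro a b
    simp only [List.foldl_cons, max_assoc]
    exact ih a (max b c)

-- the 'best' accumulator of the scan can be pulled out as a max
lemma pvGo_best (t : List String) : ∀ p r b, 0 ≤ r → 0 ≤ b → pvGo p r b t = max b (pvGo p r 0 t) := by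
  induction t with
  | nil => intro p r b _ hb; simp [pvGo]; omega
  | cons v vs ih =>
    intro p r b hr hb
    by_cases hv : v = p
    · simp only [pvGo, if_pos hv]
      rw [ih v (r + 1) (max b (r + 1)) (by omega) (by omega),
          ih v (r + 1) (max 0 (r + 1)) (by omega) (by omega)]
      omega
    · simp only [pvGo, if_neg hv]
      rw [ih v 1 (max b 1) (by omega) (by omega), ih v 1 (max 0 1) (by omega) (by omega)]
      omega

-- scanning a block of k copies of the previous value extends the run by k
lemma pvGo_replicate (k : Nat) : ∀ (x : String) (r b : Int) (rest : List String), r ≤ b →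
    pvGo x r b (List.replicate k x ++ rest) = pvGo x (r + k) (max b (r + k)) rest := by
  induction k with
  | zero =>
    intro x r b rest hrb
    simp only [List.replicate_zero, List.nil_append, Nat.cast_zero, add_zero]
    rw [max_eq_left hrb]
  | succ k ih =>
    intro x r b rest hrb
    rw [List.replicate_succ, List.cons_append]
    show (if x = x then pvGo x (r + 1) (max b (r + 1)) (List.replicate k x ++ rest)
          else pvGo x 1 (max b 1) (List.replicate k x ++ rest)) = _
    rw [if_pos rfl, ih x (r + 1) (max b (r + 1)) rest (le_max_right _ _)]
    have h1 : r + 1 + (k : Int) = r + ((k : Nat) + 1 : Nat) := by push_cast; ring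
    rw [h1]
    have h2 : max (max b (r + 1)) (r + ((k : Nat) + 1 : Nat))
        = max b (r + ((k : Nat) + 1 : Nat)) := by push_cast; omega
    rw [h2]

-- a sorted list decomposes as the block of its head followed by a head-free sorted rest
lemma sorted_decomp : ∀ (xs : List String) (x : String), (x :: xs).Pairwise (· ≤ ·) →
    ∃ (k : Nat) (rest : List String), xs = List.replicate k x ++ rest ∧ x ∉ rest ∧ rest.Pairwise (· ≤ ·) := by
  intro xs
  induction xs with
  | nil => intro x _; exact ⟨0, [], rfl, by simp, List.Pairwise.nil⟩
  | cons y ys ih =>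
    intro x hp
    rcases List.pairwise_cons.mp hp with ⟨hx, hyp⟩
    by_cases hxy : y = x
    · subst hxy
      rcases ih y hyp with ⟨k, rest, he, hnm, hpr⟩
      exact ⟨k + 1, rest, by simp [List.replicate_succ, he], hnm, hpr⟩
    · refine ⟨0, y :: ys, by simp, ?_, hyp⟩
      intro hmem
      rcases List.mem_cons.mp hmem with h | h
      · exact hxy h.symm
      · have h1 : x ≤ y := hx y List.mem_cons_self
        have h2 : y ≤ x := (List.pairwise_cons.mp hyp).1 x h
        exact hxy (le_antisymm h2 h1)

-- fold of max over copies of the accumulator is the accumulator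
lemma foldl_max_replicate (k : Nat) (v : Int) : (List.replicate k v).foldl max v = v := by
  induction k with
  | zero => rfl
  | succ k ih => simp [List.replicate_succ, ih]

-- on a sorted list, the longest run of equal values is the maximal multiplicity
lemma longestRun_sorted (n : Nat) : ∀ (s : List String), s.length = n → s.Pairwise (· ≤ ·) →
    pvLongestRun s = (s.map (fun c => (s.count c : Int))).foldl max 0 := by
  induction n using Nat.strong_induction_on with
  | _ n IH =>
    intro s hlen hp
    cases s with
    | nil => rfl
    | cons x xs =>
      rcases sorted_decomp xs x hp with ⟨k, rest, he, hnm, hpr⟩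
      subst he
      -- counts
      have hcx : (x :: (List.replicate k x ++ rest)).count x = k + 1 := by
        simp [List.count_append,
          List.count_eq_zero_of_not_mem hnm]
      have hcr : ∀ c ∈ rest, (x :: (List.replicate k x ++ rest)).count c = rest.count c := by
        intro c hc
        have hcne : x ≠ c := fun h => hnm (h ▸ hc)
        simp [List.count_append, List.count_replicate, hcne]
      -- LHS
      have hL : pvLongestRun (x :: (List.replicate k x ++ rest))
          = max ((k : Int) + 1) (pvLongestRun rest) := by
        show pvGo x 1 1 (List.replicate k x ++ rest) = _
        rw [pvGo_replicate k x 1 1 rest le_rfl]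
        have hm : max (1 : Int) (1 + k) = 1 + k := by omega
        rw [hm]
        cases rest with
        | nil => simp [pvGo, pvLongestRun]; omega
        | cons y ys =>
          have hyx : y ≠ x := fun h => hnm (by simp [h])
          simp only [pvGo, pvLongestRun, if_neg hyx]
          rw [pvGo_best ys y 1 (max (1 + (k : Int)) 1) (by omega) (by omega),
              pvGo_best ys y 1 1 (by omega) (by omega)]
          omega
      rw [hL]
      -- RHS
      have htail : List.map (fun c => ((x :: (List.replicate k x ++ rest)).count c : Int)) rest
          = List.map (fun c => ((rest.count c : Nat) : Int)) rest :=
        List.map_congr_left (fun c hc => by rw [hcr c hc])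
      have hmap : (x :: (List.replicate k x ++ rest)).map
            (fun c => (((x :: (List.replicate k x ++ rest)).count c : Nat) : Int))
          = List.replicate (k + 1) ((k : Int) + 1)
              ++ rest.map (fun c => ((rest.count c : Nat) : Int)) := by
        simp only [List.map_cons, List.map_append, List.map_replicate, hcx, htail,
          List.replicate_succ, List.cons_append]
        push_cast
        rfl
      rw [hmap, List.foldl_append]
      have h0 : (List.replicate (k + 1) ((k : Int) + 1)).foldl max 0 = (k : Int) + 1 := by
        rw [List.replicate_succ, List.foldl_cons,
          show max (0 : Int) ((k : Int) + 1) = (k : Int) + 1 by omega, foldl_max_replicate]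
      rw [h0]
      have hrest := IH rest.length
        (by rw [← hlen]; simp only [List.length_cons, List.length_append, List.length_replicate]; omega)
        rest rfl hpr
      have hsplit : List.foldl max ((k : Int) + 1)
            (rest.map (fun c => ((rest.count c : Nat) : Int)))
          = max ((k : Int) + 1)
              (List.foldl max 0 (rest.map (fun c => ((rest.count c : Nat) : Int)))) := by
        rw [← foldl_max_max]
        rw [show max ((k : Int) + 1) (0 : Int) = (k : Int) + 1 by omega]
      rw [hsplit, ← hrest]

-- maxD with identity key over a nonnegative list is the running max from 0
lemma maxD_eq_foldl (l : List Int) (h : ∀ x ∈ l, 0 ≤ x) :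
    PySem.List.maxD l (fun x => x) 0 = l.foldl max 0 := by
  cases l with
  | nil => rfl
  | cons x t =>
    unfold PySem.List.maxD
    rw [PySem.List.max?_id_cons]
    simp only [Option.getD_some]
    have hx : 0 ≤ x := h x List.mem_cons_self
    have : max (0 : Int) x = x := by omega
    rw [List.foldl_cons, this]

-- bridge: B's longest run on the sorted column equals A's max multiplicity of the column
lemma longestRun_sorted_eq_maxD (l : List String) :
    pvLongestRun (PySem.List.sorted l (fun x => x) false)
      = PySem.List.maxD (l.map (fun c => (l.count c : Int))) (fun x => x) 0 := by
  set s := PySem.List.sorted l (fun x => x) false with hs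
  have hperm : s.Perm l := PySem.List.sorted_perm l (fun x => x) false
  have hpair : s.Pairwise (· ≤ ·) := by
    have := PySem.List.sorted_pairwise (xs := l) (key := fun x => x)
    simpa using this
  rw [longestRun_sorted s.length s rfl hpair]
  have hcnt : s.map (fun c => ((s.count c : Nat) : Int))
      = s.map (fun c => ((l.count c : Nat) : Int)) :=
    List.map_congr_left (fun c _ => by rw [hperm.count_eq])
  rw [hcnt]
  have hpm : (s.map (fun c => ((l.count c : Nat) : Int))).Perm
      (l.map (fun c => ((l.count c : Nat) : Int))) := hperm.map _
  rw [List.Perm.foldl_eq hpm]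
  rw [maxD_eq_foldl _ (by intro x hx; rcases List.mem_map.mp hx with ⟨c, _, rfl⟩; positivity)]

-- ===== VERDICT (by name: the statement is the Claim_ definition above) =====
theorem calculate_chemistry_spec : Claim_equal_calculate_chemistry := by
  intro cards _
  show _ = _
  unfold calculate_chemistry calculate_chemistry_alt
  rw [fold_pair_eq_counters]
  simp only [maxD_counter_values, ← longestRun_sorted_eq_maxD]
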